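-- pv_equiv track=rewrite | github.com/Igarfinkle/ProjectEuler | HelperFunctions.py | binary
-- ===== SOURCE A (Python) =====
-- def binary(n):
--     A=[]
--     a=n
--     k=1
--     while a>0:
--         if a%(2**k)==0:
--             A.append(0)
--
--         else:
--             A.append(1)
--             a=a-(2**(k-1))
--         k+=1
--     return A
-- ===== SOURCE B (Python) =====
-- def binary(n):
--     digits = []
--     while n > 0:
--         digits.append(n % 2)
--         n //= 2
--     return digits
-- ===== Notes on version B (the rewrite author's own statement) =====
-- stated objective: simpler
-- what changed: B extracts each bit by repeated halving (n % 2, n //= 2) instead of A's growing-power-of-two modulus test with subtraction of 2**(k-1).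
import Mathlib
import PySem

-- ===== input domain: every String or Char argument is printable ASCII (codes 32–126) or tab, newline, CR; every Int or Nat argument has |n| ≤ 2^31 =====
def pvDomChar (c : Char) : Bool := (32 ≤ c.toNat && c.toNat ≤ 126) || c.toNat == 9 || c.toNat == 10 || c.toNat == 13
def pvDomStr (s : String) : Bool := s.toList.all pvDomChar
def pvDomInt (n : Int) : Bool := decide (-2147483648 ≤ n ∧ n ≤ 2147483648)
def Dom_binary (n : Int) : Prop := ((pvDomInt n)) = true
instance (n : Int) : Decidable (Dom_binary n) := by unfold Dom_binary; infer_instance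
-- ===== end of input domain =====

-- B computes the bits by repeated halving (n % 2, n //= 2) instead of A's growing
-- modulus 2**k test with subtraction; simpler, same return value.

-- ===== PORT A =====
-- A's while-loop over state (A, a, k); Python's k starts at 1 and only increments,
-- so Nat is exact for it (k-1 never wraps).  a % (2**k) with 2**k > 0: PySem.Int.mod.
def binaryLoop (a : Int) (k : Nat) : List Int :=
  if ha : a > 0 then
    if hz : PySem.Int.mod a (2 ^ k) = 0 then
      0 :: binaryLoop a (k + 1)
    else
      1 :: binaryLoop (a - 2 ^ (k - 1)) (k + 1)
  else []
termination_by (a.toNat, a.toNat + 1 - k)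
decreasing_by
  · -- a unchanged, k grows; the divisibility hypothesis bounds k below a
    apply Prod.Lex.right
    have hd : (2 : Int) ^ k ∣ a := (PySem.Int.mod_eq_zero_iff_dvd a (2 ^ k)).mp hz
    have h1 : (2 : Int) ^ k ≤ a := Int.le_of_dvd ha hd
    have h2 : (k : Int) < 2 ^ k := by exact_mod_cast Nat.lt_two_pow_self
    omega
  · apply Prod.Lex.left
    have h1 : (0 : Int) < 2 ^ (k - 1) := by positivity
    omega

def binary (n : Int) : List Int := binaryLoop n 1

-- ===== PORT B =====
def altLoop (digits : List Int) (n : Int) : List Int :=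
  if _h : n > 0 then
    altLoop (digits ++ [PySem.Int.mod n 2]) (PySem.Int.floordiv n 2)
  else digits
termination_by n.toNat
decreasing_by
  rw [PySem.Int.floordiv_eq_ediv_of_pos (by omega)]
  omega

def binary_alt (n : Int) : List Int := altLoop [] n

-- ===== PRECONDITION & SPEC =====
def Spec_binary (n : Int) (out : List Int) : Prop := out = binary_alt n
instance (n : Int) (out : List Int) : Decidable (Spec_binary n out) := by unfold Spec_binary; infer_instance

-- ===== CLAIM (what is proved, stated in full; the proofs are below) =====
def Claim_equal_binary : Prop := ∀ (n : Int), Dom_binary n → Spec_binary n (binary n)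

-- ===== LEMMAS AND PROOFS =====

-- B's loop appends to the accumulator: peel the accumulator off
lemma altLoop_acc : ∀ (N : Nat) (n : Int), n.toNat ≤ N → ∀ digits,
    altLoop digits n = digits ++ altLoop [] n := by
  intro N
  induction N with
  | zero =>
    intro n hn digits
    conv_lhs => rw [altLoop]
    conv_rhs => rw [altLoop]
    rw [dif_neg (by omega), dif_neg (by omega)]
    simp
  | succ N ih =>
    intro n hn digits
    by_cases h : n > 0
    · have hd2 : PySem.Int.floordiv n 2 = n / 2 := PySem.Int.floordiv_eq_ediv_of_pos (by norm_num)
      have hlt : (PySem.Int.floordiv n 2).toNat ≤ N := by rw [hd2]; omega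
      conv_lhs => rw [altLoop]
      conv_rhs => rw [altLoop]
      rw [dif_pos h, dif_pos h, ih _ hlt (digits ++ [PySem.Int.mod n 2]),
          ih _ hlt ([] ++ [PySem.Int.mod n 2])]
      simp
    · conv_lhs => rw [altLoop]
      conv_rhs => rw [altLoop]
      rw [dif_neg h, dif_neg h]
      simp

-- the invariant: A's state a is m * 2^(k-1) where m is B's remaining value
lemma loop_eq : ∀ (N : Nat) (m : Int), m.toNat ≤ N → ∀ k : Nat, 1 ≤ k →
    binaryLoop (m * 2 ^ (k - 1)) k = altLoop [] m := by
  intro N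
  induction N with
  | zero =>
    intro m hm k hk
    have hp : (0:Int) < 2 ^ (k - 1) := by positivity
    have hm0 : m ≤ 0 := by omega
    conv_lhs => rw [binaryLoop]
    rw [dif_neg (not_lt.mpr (mul_nonpos_iff.mpr (Or.inr ⟨hm0, hp.le⟩)))]
    conv_rhs => rw [altLoop]
    rw [dif_neg (by omega)]
  | succ N ih =>
    intro m hm k hk
    by_cases hpos : 0 < m
    · have hp : (0:Int) < 2 ^ (k - 1) := by positivity
      have hc : (2:Int) ^ (k - 1) ≠ 0 := hp.ne'
      have hsplit : (2:Int) ^ k = 2 ^ (k - 1) * 2 := by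
        rw [← pow_succ]; congr 1; omega
      have ha : m * 2 ^ (k - 1) > 0 := by positivity
      have hmod2 : PySem.Int.mod m 2 = m % 2 := PySem.Int.mod_eq_emod_of_pos (by norm_num)
      have hdiv2 : PySem.Int.floordiv m 2 = m / 2 := PySem.Int.floordiv_eq_ediv_of_pos (by norm_num)
      conv_lhs => rw [binaryLoop]
      rw [dif_pos ha]
      conv_rhs => rw [altLoop]
      rw [dif_pos hpos, List.nil_append,
          altLoop_acc (PySem.Int.floordiv m 2).toNat _ le_rfl [PySem.Int.mod m 2]]
      have hdvd_iff : PySem.Int.mod (m * 2 ^ (k - 1)) (2 ^ k) = 0 ↔ (2:Int) ∣ m := by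
        rw [PySem.Int.mod_eq_zero_iff_dvd, hsplit, mul_comm ((2:Int) ^ (k - 1)) 2]
        exact mul_dvd_mul_iff_right hc
      have hih : ∀ t : Int, t.toNat ≤ N → binaryLoop (t * 2 ^ k) (k + 1) = altLoop [] t := by
        intro t ht
        have h1 : t * 2 ^ k = t * 2 ^ ((k + 1) - 1) := by norm_num
        rw [h1]; exact ih t ht (k + 1) (by omega)
      by_cases hev : (2:Int) ∣ m
      · rw [dif_pos (hdvd_iff.mpr hev)]
        obtain ⟨t, rfl⟩ := hev
        have harr : 2 * t * 2 ^ (k - 1) = t * 2 ^ k := by rw [hsplit]; ring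
        have h1 : (2 * t) % 2 = 0 := by omega
        have h2 : (2 * t) / 2 = t := by omega
        rw [harr, hih t (by omega), hmod2, hdiv2, h1, h2]
        rfl
      · rw [dif_neg (fun h => hev (hdvd_iff.mp h))]
        obtain ⟨t, ht⟩ : ∃ t, m = 2 * t + 1 := ⟨m / 2, by omega⟩
        subst ht
        have harr : (2 * t + 1) * 2 ^ (k - 1) - 2 ^ (k - 1) = t * 2 ^ k := by rw [hsplit]; ring
        have h1 : (2 * t + 1) % 2 = 1 := by omega
        have h2 : (2 * t + 1) / 2 = t := by omega
        rw [harr, hih t (by omega), hmod2, hdiv2, h1, h2]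
        rfl
    · have hp : (0:Int) < 2 ^ (k - 1) := by positivity
      have hm0 : m ≤ 0 := by omega
      conv_lhs => rw [binaryLoop]
      rw [dif_neg (not_lt.mpr (mul_nonpos_iff.mpr (Or.inr ⟨hm0, hp.le⟩)))]
      conv_rhs => rw [altLoop]
      rw [dif_neg (by omega)]

-- ===== VERDICT (by name: the statement is the Claim_ definition above) =====
theorem binary_spec : Claim_equal_binary := by
  intro n _
  show binary n = binary_alt n
  have := loop_eq n.toNat n le_rfl 1 le_rfl
  simpa [binary, binary_alt] using this
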